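-- pv_equiv track=rewrite | github.com/lzk9508/DaFIR | code_dafir/data_prepare_flow/filling.py | getnear
-- ===== SOURCE A (Python) =====
-- import math
--
-- break_pix = 500
--
-- def getnear(cors, values, now_cor):
--     min = 100
--     value = break_pix
--     for i in range(0, len(cors)):
--         cor = cors[i]
--         leng = math.sqrt(pow(cor[0] - now_cor[0], 2) + pow(cor[1] - now_cor[1], 2))
--         if(leng < min):
--             min = leng
--             value = values[i]
--     return value
-- ===== SOURCE B (Python) =====
-- break_pix = 500
--
-- def getnear(cors, values, now_cor):
--     order = sorted(range(len(cors)),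
--                    key=lambda i: (cors[i][0] - now_cor[0]) ** 2 + (cors[i][1] - now_cor[1]) ** 2)
--     if not order:
--         return break_pix
--     i = order[0]
--     if (cors[i][0] - now_cor[0]) ** 2 + (cors[i][1] - now_cor[1]) ** 2 < 100 ** 2:
--         return values[i]
--     return break_pix
-- ===== Notes on version B (the rewrite author's own statement) =====
-- stated objective: alternative
-- what changed: A folds the 100-pixel threshold into a single running-minimum scan (math.sqrt+pow per element, min seeded at 100) that tracks the chosen value; B instead stably sorts the indices by exact integer squared distance, takes the head of the sorted order, and applies the threshold once afterwards (sort-then-decide), never computing a square root.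
import Mathlib
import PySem

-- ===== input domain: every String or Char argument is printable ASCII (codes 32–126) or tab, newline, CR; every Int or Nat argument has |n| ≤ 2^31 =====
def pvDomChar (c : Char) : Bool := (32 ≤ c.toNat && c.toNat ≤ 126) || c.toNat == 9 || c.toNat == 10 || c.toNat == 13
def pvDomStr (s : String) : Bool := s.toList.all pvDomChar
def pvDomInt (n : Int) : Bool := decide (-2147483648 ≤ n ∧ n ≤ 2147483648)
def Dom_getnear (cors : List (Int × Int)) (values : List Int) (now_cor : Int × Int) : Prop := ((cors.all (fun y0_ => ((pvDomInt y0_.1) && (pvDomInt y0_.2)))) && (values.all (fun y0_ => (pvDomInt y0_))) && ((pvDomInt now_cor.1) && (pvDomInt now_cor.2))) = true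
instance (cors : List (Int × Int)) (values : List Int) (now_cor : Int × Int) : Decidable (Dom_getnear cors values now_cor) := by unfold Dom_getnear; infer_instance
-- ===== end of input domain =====

-- B replaces A's threshold-seeded running-minimum scan by sort-then-decide: stably sort the
-- indices by squared distance, take the first, and apply the 100-pixel threshold once afterwards.

-- ===== PORT A =====
-- A compares math.sqrt distances against a running minimum seeded at 100. The port compares the
-- integer squared distances against a running squared minimum seeded at 100**2 = 10000. This is
-- exact on integer inputs: an update requires a float distance < 100, i.e. squared distance
-- < 10000, and such squared distances (< 10000) are represented and compared exactly by Python's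
-- correctly-rounded float(int) and math.sqrt (relative error ~2^-53, while distinct square roots
-- below 100 differ by more than 0.005).
def getnear (cors : List (Int × Int)) (values : List Int) (now_cor : Int × Int) : Int :=
  ((PySem.List.pyRange 0 (cors.length : Int) 1).foldl
    (fun (st : Int × Int) i =>
      let cor := (PySem.List.pyGet? cors i).getD (0, 0)
      let leng2 := (cor.1 - now_cor.1) ^ 2 + (cor.2 - now_cor.2) ^ 2   -- squared `leng`; see note above
      if leng2 < st.1 then (leng2, (PySem.List.pyGet? values i).getD 0) else st)
    (10000, 500)).2

-- ===== PORT B =====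
-- the lambda i: squared distance of cors[i] to now_cor (B works on exact integer squares)
def getnear_key (cors : List (Int × Int)) (now_cor : Int × Int) (i : Int) : Int :=
  let cor := (PySem.List.pyGet? cors i).getD (0, 0)
  (cor.1 - now_cor.1) ^ 2 + (cor.2 - now_cor.2) ^ 2

def getnear_alt (cors : List (Int × Int)) (values : List Int) (now_cor : Int × Int) : Int :=
  let order := PySem.List.sorted (PySem.List.pyRange 0 (cors.length : Int) 1)
                 (getnear_key cors now_cor) false
  match order with
  | [] => 500
  | i :: _ =>
    if getnear_key cors now_cor i < 100 ^ 2 then (PySem.List.pyGet? values i).getD 0 else 500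

-- ===== PRECONDITION & SPEC =====
-- Pre_ is exactly where the Python A returns normally: A reads values[i] precisely at the
-- indices i whose (squared) distance is below the threshold and strictly below every earlier
-- one, so A raises IndexError iff such an index lies past the end of values.
def Pre_getnear (cors : List (Int × Int)) (values : List Int) (now_cor : Int × Int) : Prop :=
  ∀ i : Nat, i < cors.length →
    ((cors[i]!.1 - now_cor.1) ^ 2 + (cors[i]!.2 - now_cor.2) ^ 2 < 10000 ∧
     ∀ j : Nat, j < i →
       (cors[i]!.1 - now_cor.1) ^ 2 + (cors[i]!.2 - now_cor.2) ^ 2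
         < (cors[j]!.1 - now_cor.1) ^ 2 + (cors[j]!.2 - now_cor.2) ^ 2) →
    i < values.length
instance (cors : List (Int × Int)) (values : List Int) (now_cor : Int × Int) : Decidable (Pre_getnear cors values now_cor) := by unfold Pre_getnear; infer_instance

def pvWitness_getnear : (List (Int × Int)) × List Int × (Int × Int) := ([(0, 1), (5, 5)], [7, 9], (0, 0))

def Spec_getnear (cors : List (Int × Int)) (values : List Int) (now_cor : Int × Int) (out : Int) : Prop := out = getnear_alt cors values now_cor
instance (cors : List (Int × Int)) (values : List Int) (now_cor : Int × Int) (out : Int) : Decidable (Spec_getnear cors values now_cor out) := by unfold Spec_getnear; infer_instance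

-- ===== CLAIM (what is proved, stated in full; the proofs are below) =====
def Claim_equal_getnear : Prop := ∀ (cors : List (Int × Int)) (values : List Int) (now_cor : Int × Int), Dom_getnear cors values now_cor → Pre_getnear cors values now_cor → Spec_getnear cors values now_cor (getnear cors values now_cor)

-- ===== LEMMAS AND PROOFS =====

-- A's loop state, read off the head of B's (partially built) stably-sorted index list:
-- the head is the first index of minimal squared distance, and A's state is exactly that
-- head pushed through the threshold decision.
def getnear_abs (key : Int → Int) (valAt : Int → Int) (acc : List Int) : Int × Int :=
  match acc with
  | [] => (10000, 500)
  | i :: _ => if key i < 10000 then (key i, valAt i) else (10000, 500)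

theorem getnear_abs_insertBy (key valAt : Int → Int) (x : Int) (acc : List Int) :
    getnear_abs key valAt (PySem.List.insertBy (fun a b => decide (key a < key b)) x acc)
    = (if key x < (getnear_abs key valAt acc).1 then (key x, valAt x)
       else getnear_abs key valAt acc) := by
  cases acc with
  | nil => simp only [PySem.List.insertBy, getnear_abs]
  | cons h t =>
    simp only [PySem.List.insertBy, decide_eq_true_eq]
    by_cases hxh : key x < key h
    · rw [if_pos hxh]
      simp only [getnear_abs]
      by_cases h2 : key h < 10000
      · rw [if_pos h2, if_pos (by omega : key x < (key h, valAt h).1),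
            if_pos (by omega : key x < 10000)]
      · rw [if_neg h2]
    · rw [if_neg hxh]
      simp only [getnear_abs]
      by_cases h2 : key h < 10000
      · rw [if_pos h2, if_neg (by omega : ¬ key x < (key h, valAt h).1)]
      · rw [if_neg h2, if_neg (by omega : ¬ key x < ((10000 : Int), (500 : Int)).1)]

theorem getnear_loop_eq_sortHead (key valAt : Int → Int) (l acc : List Int) :
    l.foldl (fun (st : Int × Int) i => if key i < st.1 then (key i, valAt i) else st)
      (getnear_abs key valAt acc)
    = getnear_abs key valAt
        (l.foldl (fun a x => PySem.List.insertBy (fun a b => decide (key a < key b)) x a) acc) := by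
  induction l generalizing acc with
  | nil => rfl
  | cons x l ih =>
    simp only [List.foldl_cons]
    rw [← getnear_abs_insertBy key valAt x acc, ih]

-- ===== VERDICT (by name: the statement is the Claim_ definition above) =====
theorem getnear_spec : Claim_equal_getnear := by
  intro cors values now_cor _ _
  unfold Spec_getnear
  show (List.foldl
      (fun (st : Int × Int) i =>
        if getnear_key cors now_cor i < st.1
          then (getnear_key cors now_cor i, (PySem.List.pyGet? values i).getD 0) else st)
      (getnear_abs (getnear_key cors now_cor) (fun i => (PySem.List.pyGet? values i).getD 0) [])
      (PySem.List.pyRange 0 (cors.length : Int) 1)).2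
    = getnear_alt cors values now_cor
  rw [getnear_loop_eq_sortHead]
  unfold getnear_alt
  rw [PySem.List.sorted_eq_foldl_insertBy]
  cases h : (PySem.List.pyRange 0 (cors.length : Int) 1).foldl
      (fun a x => PySem.List.insertBy
        (fun a b => decide (getnear_key cors now_cor a < getnear_key cors now_cor b)) x a) [] with
  | nil => simp only [getnear_abs]
  | cons i t =>
    simp only [getnear_abs]
    rw [show ((100 : Int) ^ 2) = 10000 from by norm_num]
    split_ifs with h1 <;> rfl
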